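-- pv_equiv track=rewrite | github.com/matthewjmuscat/biopsylocalization-python | python_files_dcm_meta_based/anatomy_reconstructor_tools.py | build_pairings_list
-- ===== SOURCE A (Python) =====
-- def build_pairings_list(num_points_in_all_slices):
--     test_pairings_list_all = [None]*num_points_in_all_slices
--     point_indices = [x for x in range(num_points_in_all_slices)]
--     for i in range(num_points_in_all_slices):
--         test_pairings_list = [None]*num_points_in_all_slices
--         for j in range(num_points_in_all_slices):
--             adjacent_index = (j+i) % num_points_in_all_slices
--             pairing = (point_indices[j], point_indices[adjacent_index])
--             test_pairings_list[j] = pairing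
--         test_pairings_list_all[i] = test_pairings_list
--     return test_pairings_list_all
-- ===== SOURCE B (Python) =====
-- def build_pairings_list(num_points_in_all_slices):
--     point_indices = list(range(num_points_in_all_slices))
--     rotated = point_indices
--     result = []
--     for _ in range(num_points_in_all_slices):
--         result.append(list(zip(point_indices, rotated)))
--         rotated = rotated[1:] + rotated[:1]
--     return result
-- ===== Notes on version B (the rewrite author's own statement) =====
-- stated objective: alternative
-- what changed: B keeps a rotation accumulator carried across iterations: each row is zip(indices, state) and the state is rotated by one element per step, so the inner modular-arithmetic loop and the preallocated None rows disappear.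
import Mathlib
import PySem

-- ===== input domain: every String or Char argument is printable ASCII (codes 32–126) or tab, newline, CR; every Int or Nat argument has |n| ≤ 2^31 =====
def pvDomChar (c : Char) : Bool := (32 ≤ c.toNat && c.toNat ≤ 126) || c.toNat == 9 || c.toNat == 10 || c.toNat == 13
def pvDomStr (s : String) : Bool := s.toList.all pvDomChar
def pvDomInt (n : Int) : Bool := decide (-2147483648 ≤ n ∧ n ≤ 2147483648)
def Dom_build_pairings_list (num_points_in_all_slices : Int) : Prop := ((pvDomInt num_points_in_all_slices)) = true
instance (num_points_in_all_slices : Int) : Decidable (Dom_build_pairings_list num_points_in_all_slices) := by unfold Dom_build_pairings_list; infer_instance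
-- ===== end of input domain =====

-- B carries a rotation accumulator across iterations (rotate the state by one each step, zip it against the indices),
-- removing A's inner modular-index loop and preallocated None rows (alternative decomposition, same cost).

-- ===== PORT A =====
-- 'test_pairings_list[j] = pairing' fills a preallocated list at successive j of range(n): ported as a map over that range.
def build_pairings_list (num_points_in_all_slices : Int) : List (List (Int × Int)) :=
  let point_indices := PySem.List.pyRange 0 num_points_in_all_slices 1
  (PySem.List.pyRange 0 num_points_in_all_slices 1).map (fun i =>
    (PySem.List.pyRange 0 num_points_in_all_slices 1).map (fun j =>
      let adjacent_index := PySem.Int.mod (j + i) num_points_in_all_slices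
      (PySem.List.pyGetD point_indices j 0, PySem.List.pyGetD point_indices adjacent_index 0)))

-- ===== PORT B =====
-- the 'for _ in range(n)' loop with carried state 'rotated' and accumulating 'result', as structural recursion on the counter
def pvAltLoop (point_indices : List Int) : Nat → List Int → List (List (Int × Int))
  | 0, _ => []
  | k+1, rotated =>
      List.zip point_indices rotated ::
      pvAltLoop point_indices k
        (PySem.List.slice rotated (some 1) none ++ PySem.List.slice rotated none (some 1))

def build_pairings_list_alt (num_points_in_all_slices : Int) : List (List (Int × Int)) :=
  let point_indices := PySem.List.pyRange 0 num_points_in_all_slices 1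
  pvAltLoop point_indices num_points_in_all_slices.toNat point_indices

-- ===== PRECONDITION & SPEC =====
def Spec_build_pairings_list (num_points_in_all_slices : Int) (out : List (List (Int × Int))) : Prop := out = build_pairings_list_alt num_points_in_all_slices
instance (num_points_in_all_slices : Int) (out : List (List (Int × Int))) : Decidable (Spec_build_pairings_list num_points_in_all_slices out) := by unfold Spec_build_pairings_list; infer_instance

-- ===== CLAIM (what is proved, stated in full; the proofs are below) =====
def Claim_equal_build_pairings_list : Prop := ∀ (num_points_in_all_slices : Int), Dom_build_pairings_list num_points_in_all_slices → Spec_build_pairings_list num_points_in_all_slices (build_pairings_list num_points_in_all_slices)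

-- ===== LEMMAS AND PROOFS =====
-- one step of B's slice-rotation is List.rotate 1
lemma step_rotate (L : List Int) :
    PySem.List.slice L (some 1) none ++ PySem.List.slice L none (some 1) = L.rotate 1 := by
  rw [PySem.List.slice_from L (by norm_num), PySem.List.slice_to L (by norm_num)]
  cases L with
  | nil => simp
  | cons a t =>
      rw [List.rotate_eq_drop_append_take (by simp)]; norm_num

-- B's loop unrolled: k rows, row t is the start state rotated t times
lemma pvAltLoop_eq (idx : List Int) : ∀ (k : Nat) (rot : List Int),
    pvAltLoop idx k rot = (List.range k).map (fun t => List.zip idx (rot.rotate t)) := by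
  intro k
  induction k with
  | zero => intro rot; simp [pvAltLoop]
  | succ k ih =>
      intro rot
      rw [pvAltLoop, step_rotate, ih, List.range_succ_eq_map]
      simp [List.map_map, Function.comp, List.rotate_rotate, Nat.add_comm]

-- A's row i equals the index list zipped with itself rotated by i
lemma rowA_eq (n i : Int) (hi0 : 0 ≤ i) (hin : i < n) :
    (PySem.List.pyRange 0 n 1).map (fun j =>
      (PySem.List.pyGetD (PySem.List.pyRange 0 n 1) j 0,
       PySem.List.pyGetD (PySem.List.pyRange 0 n 1) (PySem.Int.mod (j + i) n) 0)) =
    List.zip (PySem.List.pyRange 0 n 1) ((PySem.List.pyRange 0 n 1).rotate i.toNat) := by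
  have hn : 0 < n := lt_of_le_of_lt hi0 hin
  have hlen : (PySem.List.pyRange 0 n 1).length = n.toNat := by
    rw [PySem.List.length_pyRange_one]; omega
  rw [List.rotate_eq_drop_append_take (by rw [hlen]; omega)]
  apply List.ext_getElem
  · simp [hlen]; omega
  · intro k h1 h2
    simp only [List.getElem_map, List.getElem_zip, PySem.List.getElem_pyRange_one]
    have hk : k < n.toNat := by simpa [hlen] using h1
    have hget : ∀ (m : Int), 0 ≤ m → m < n →
        PySem.List.pyGetD (PySem.List.pyRange 0 n 1) m 0 = m := by
      intro m hm0 hmn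
      rw [PySem.List.pyGetD_eq_getElem _ 0 hm0 (by rw [hlen]; omega),
          PySem.List.getElem_pyRange_one]
      omega
    rw [PySem.Int.mod_eq_emod_of_pos hn]
    rw [hget (0 + ↑k) (by omega) (by omega)]
    rw [hget ((0 + ↑k + i) % n) (Int.emod_nonneg _ (by omega)) (Int.emod_lt_of_pos _ hn)]
    by_cases hc : k < ((PySem.List.pyRange 0 n 1).drop i.toNat).length
    · rw [List.getElem_append_left hc, List.getElem_drop, PySem.List.getElem_pyRange_one]
      simp only [List.length_drop, hlen] at hc
      simp only [Prod.mk.injEq, true_and]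
      rw [Int.emod_eq_of_lt (by omega) (by omega)]; omega
    · rw [List.getElem_append_right (le_of_not_gt hc), List.getElem_take,
          PySem.List.getElem_pyRange_one]
      simp only [List.length_drop, hlen] at hc ⊢
      simp only [Prod.mk.injEq, true_and]
      have hx : (0 + (k:Int) + i) % n = 0 + (k:Int) + i - n := by
        conv_lhs => rw [show (0:Int) + (k:Int) + i = (0 + (k:Int) + i - n) + n * 1 by ring]
        rw [Int.add_mul_emod_self_left]
        exact Int.emod_eq_of_lt (by omega) (by omega)
      rw [hx]; omega

-- ===== VERDICT (by name: the statement is the Claim_ definition above) =====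
theorem build_pairings_list_spec : Claim_equal_build_pairings_list := by
  intro n _
  unfold Spec_build_pairings_list build_pairings_list build_pairings_list_alt
  rw [pvAltLoop_eq]
  apply List.ext_getElem
  · simp [PySem.List.length_pyRange_one]
  · intro t h1 h2
    have ht : t < n.toNat := by
      simpa [PySem.List.length_pyRange_one] using h1
    simp only [List.getElem_map, PySem.List.getElem_pyRange_one, List.getElem_range]
    have := rowA_eq n (0 + (t:Int)) (by omega) (by omega)
    simpa [Int.toNat_natCast] using this
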